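-- pv_equiv track=rewrite | github.com/Rohit-Kmr/DBMS | Rohit_27_DBMS.py | equivalance
-- ===== SOURCE A (Python) =====
-- def closure(elems, fds):
--     '''
--     Objective : Find closure for given functional dependencies.
--     --------------------------------------------------------------------------------------
--     Parameters:
--         elems <String>            Elements in question for closure
--         fds <list of tuples>       Tuples of x -> b in form ('X1X2X3', 'Y1')
--     --------------------------------------------------------------------------------------
--     Returns <set of elements>:
--         set of elements under closure here element is in string.
--     '''
--     closure = set(elems)
--
--     while(1):
--         l=len(closure)
--         for i in range(len(fds)):
--             if set(fds[i][0]).issubset(closure):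
--                 closure.update(fds[i][1])
--         if len(closure)==l:
--             break
--
--     return closure
--
-- def equivalance(fds1,fds2):
--     '''
--     Objective : Find Whether the 2 FDs are Equivalent or not
--     ----------------------------------------------------------------------------------------------------
--     Parameters :
--                 fds1 <list of tuples>        first fd Tuples of x -> b in form ('X1X2X3', 'Y1')
--                 fds2 <list of tuples>        second fd Tuples of x -> b in form ('X1X2X3', 'Y1')
--     ----------------------------------------------------------------------------------------------------
--     Return <Boolean> : Return True if Both Fds are equivalent else False
--
--     '''
--     # checking whether fds1 is subset of fds2 or not
--     for i in fds1:
--         t1=closure(i[0],fds1)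
--         t2=closure(i[0],fds2)
--         if t1==t2:
--             pass
--         else:
--             return False
--
--     #checking whether fds2 is subset of fds1 or not
--     for i in fds2:
--         t1=closure(i[0],fds1)
--         t2=closure(i[0],fds2)
--         if t1==t2:
--             pass
--         else:
--             return False
--
--     return True
-- ===== SOURCE B (Python) =====
-- def closure_fire(elems, fds):
--     # Fire-once saturation: repeatedly pick the first FD whose LHS is contained
--     # in the current set and whose RHS still adds something, add its RHS and
--     # delete that FD (a fired FD can never add anything again).
--     s = set(elems)
--     rem = list(fds)
--     while True:
--         for k, (l, r) in enumerate(rem):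
--             if set(l) <= s and not (set(r) <= s):
--                 s.update(r)
--                 del rem[k]
--                 break
--         else:
--             return s
--
-- def equivalance(fds1, fds2):
--     lhss = list(dict.fromkeys(l for l, _ in fds1 + fds2))
--     return all(closure_fire(x, fds1) == closure_fire(x, fds2) for x in lhss)
-- ===== Notes on version B (the rewrite author's own statement) =====
-- stated objective: alternative
-- what changed: The closure routine is replaced by a fire-once saturation worklist (pick the first FD whose LHS is contained in the set and whose RHS still adds attributes, add its RHS, delete that FD) instead of A's repeated full passes until the set size stabilises, and the top level runs the closure pair once per distinct LHS (deduplicated) instead of once per FD occurrence.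
import Mathlib
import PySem

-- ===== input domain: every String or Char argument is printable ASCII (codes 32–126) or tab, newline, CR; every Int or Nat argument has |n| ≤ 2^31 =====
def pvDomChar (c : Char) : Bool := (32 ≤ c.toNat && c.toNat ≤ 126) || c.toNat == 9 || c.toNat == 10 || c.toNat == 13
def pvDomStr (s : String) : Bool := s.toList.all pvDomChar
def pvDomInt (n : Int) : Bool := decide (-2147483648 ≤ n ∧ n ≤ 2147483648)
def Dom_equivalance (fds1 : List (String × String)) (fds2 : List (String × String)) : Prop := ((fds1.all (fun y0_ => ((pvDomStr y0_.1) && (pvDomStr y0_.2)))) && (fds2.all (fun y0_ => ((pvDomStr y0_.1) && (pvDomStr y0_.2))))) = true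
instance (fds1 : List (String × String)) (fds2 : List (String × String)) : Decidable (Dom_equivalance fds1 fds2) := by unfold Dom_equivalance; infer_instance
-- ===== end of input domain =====

-- B replaces A's repeated full-pass closure loop by a fire-once saturation worklist (each FD is
-- deleted after it fires) and checks each distinct LHS once; objective: alternative.



-- ===== PORT A =====
-- one pass of A's inner 'for i in range(len(fds))' loop (closure.update in place)
def onePass (fds : List (String × String)) (S : PySem.Set Char) : PySem.Set Char :=
  fds.foldl (fun S fd =>
    if PySem.Set.issubset (PySem.Set.ofList fd.1.toList) S
    then PySem.Set.update S fd.2.toList else S) S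

-- A's 'while(1)' loop; the fuel only makes the recursion total and is chosen large enough to
-- never run out (proved below: the set grows strictly before every recursive call and is bounded)
def loopA (fds : List (String × String)) : Nat → PySem.Set Char → PySem.Set Char
  | 0, S => S
  | fuel + 1, S =>
    let S' := onePass fds S
    if S'.length = S.length then S' else loopA fds fuel S'

def closureA (elems : String) (fds : List (String × String)) : PySem.Set Char :=
  loopA fds (elems.toList.length + (fds.map (fun fd => fd.2.toList.length)).sum + 1)
    (PySem.Set.ofList elems.toList)

-- A's 'for i in …: … if t1==t2: pass else: return False' loop (same shape for both loops of A)
def checkAll (l fds1 fds2 : List (String × String)) : Bool :=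
  match l with
  | [] => true
  | i :: rest =>
    if PySem.Set.equal (closureA i.1 fds1) (closureA i.1 fds2)
    then checkAll rest fds1 fds2 else false

def equivalance (fds1 : List (String × String)) (fds2 : List (String × String)) : Bool :=
  if checkAll fds1 fds1 fds2 then checkAll fds2 fds1 fds2 else false


-- ===== PORT B =====
-- Source B's 'for k, (l, r) in enumerate(rem)' scan: first FD that fires, and rem with it deleted
def pickFire (S : PySem.Set Char) : List (String × String) → Option ((String × String) × List (String × String))
  | [] => none
  | fd :: rest =>
    if PySem.Set.issubset (PySem.Set.ofList fd.1.toList) S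
        && !(PySem.Set.issubset (PySem.Set.ofList fd.2.toList) S)
    then some (fd, rest)
    else (pickFire S rest).map (fun p => (p.1, fd :: p.2))

-- termination of the worklist loop: the fired FD is deleted, so rem shrinks
theorem pickFire_length {S : PySem.Set Char} : ∀ {rem fd rest}, pickFire S rem = some (fd, rest) → rest.length < rem.length := by
  intro rem
  induction rem with
  | nil => intro _ _ h; simp [pickFire] at h
  | cons a l ih =>
    intro fd rest h
    simp only [pickFire] at h
    split at h
    · simp_all
    · cases hp : pickFire S l with
      | none => rw [hp] at h; simp at h
      | some p =>
        rw [hp] at h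
        simp only [Option.map_some] at h
        cases h
        have := ih (fd := p.1) (rest := p.2) (by rw [hp])
        simp only [List.length_cons]
        omega

def closLoop (S : PySem.Set Char) (rem : List (String × String)) : PySem.Set Char :=
  match h : pickFire S rem with
  | none => S
  | some (fd, rest) => closLoop (PySem.Set.update S fd.2.toList) rest
termination_by rem.length
decreasing_by exact pickFire_length h

def closureB (elems : String) (fds : List (String × String)) : PySem.Set Char :=
  closLoop (PySem.Set.ofList elems.toList) fds

def equivalance_alt (fds1 : List (String × String)) (fds2 : List (String × String)) : Bool :=
  (PySem.List.dedup ((fds1 ++ fds2).map Prod.fst)).all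
    (fun x => PySem.Set.equal (closureB x fds1) (closureB x fds2))


-- ===== PRECONDITION & SPEC =====
def Spec_equivalance (fds1 : List (String × String)) (fds2 : List (String × String)) (out : Bool) : Prop := out = equivalance_alt fds1 fds2
instance (fds1 : List (String × String)) (fds2 : List (String × String)) (out : Bool) : Decidable (Spec_equivalance fds1 fds2 out) := by unfold Spec_equivalance; infer_instance

-- ===== CLAIM (what is proved, stated in full; the proofs are below) =====
def Claim_equal_equivalance : Prop := ∀ (fds1 : List (String × String)) (fds2 : List (String × String)), Dom_equivalance fds1 fds2 → Spec_equivalance fds1 fds2 (equivalance fds1 fds2)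

-- ===== LEMMAS AND PROOFS =====
-- S is closed under the FDs
def Closed (fds : List (String × String)) (S : List Char) : Prop :=
  ∀ fd ∈ fds, (∀ c ∈ fd.1.toList, c ∈ S) → ∀ c ∈ fd.2.toList, c ∈ S

theorem step_prefix (fd : String × String) (S : PySem.Set Char) :
    ∃ t, (if PySem.Set.issubset (PySem.Set.ofList fd.1.toList) S
          then PySem.Set.update S fd.2.toList else S) = S ++ t := by
  split
  · exact ⟨_, PySem.Set.update_eq_append_filter _ _⟩
  · exact ⟨[], by simp⟩

theorem onePass_prefix (fds : List (String × String)) (S : PySem.Set Char) :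
    ∃ t, onePass fds S = S ++ t := by
  induction fds generalizing S with
  | nil => exact ⟨[], by simp [onePass]⟩
  | cons fd fds ih =>
    obtain ⟨t1, h1⟩ := step_prefix fd S
    obtain ⟨t2, h2⟩ := ih ((if PySem.Set.issubset (PySem.Set.ofList fd.1.toList) S
          then PySem.Set.update S fd.2.toList else S))
    refine ⟨t1 ++ t2, ?_⟩
    simp only [onePass, List.foldl_cons] at h2 ⊢
    rw [h2, h1, List.append_assoc]

theorem mem_onePass {fds : List (String × String)} {S : PySem.Set Char} {c : Char}
    (h : c ∈ onePass fds S) : c ∈ S ∨ ∃ fd ∈ fds, c ∈ fd.2.toList := by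
  induction fds generalizing S with
  | nil => simp [onePass] at h; exact Or.inl h
  | cons fd fds ih =>
    simp only [onePass, List.foldl_cons] at h
    rcases ih h with h' | h'
    · split at h'
      · rcases (PySem.Set.mem_update _ _ _).mp h' with h'' | h''
        · exact Or.inl h''
        · exact Or.inr ⟨fd, by simp, h''⟩
      · exact Or.inl h'
    · exact Or.inr ⟨h'.choose, by simp [h'.choose_spec.1], h'.choose_spec.2⟩

theorem nodup_onePass {fds : List (String × String)} {S : PySem.Set Char}
    (h : S.Nodup) : (onePass fds S).Nodup := by
  induction fds generalizing S with
  | nil => simpa [onePass]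
  | cons fd fds ih =>
    simp only [onePass, List.foldl_cons]
    apply ih
    split
    · exact PySem.Set.nodup_update _ _ h
    · exact h

theorem onePass_fix_closed {fds : List (String × String)} {S : PySem.Set Char}
    (h : onePass fds S = S) : Closed fds S := by
  induction fds generalizing S with
  | nil => intro fd hfd; simp at hfd
  | cons fd fds ih =>
    obtain ⟨t1, h1⟩ := step_prefix fd S
    obtain ⟨t2, h2⟩ := onePass_prefix fds ((if PySem.Set.issubset (PySem.Set.ofList fd.1.toList) S
          then PySem.Set.update S fd.2.toList else S))
    simp only [onePass, List.foldl_cons] at h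
    simp only [onePass] at h2
    rw [h1] at h h2
    have hlen := congrArg List.length (h2.symm.trans h)
    simp at hlen
    have ht1 : t1 = [] := by rcases t1 with _ | _ <;> simp_all
    subst ht1
    simp only [List.append_nil] at h1 h2
    intro fd' hfd'
    rcases List.mem_cons.mp hfd' with rfl | hfd'
    · intro hl c hc
      have hsub : PySem.Set.issubset (PySem.Set.ofList fd'.1.toList) S = true := by
        rw [PySem.Set.issubset_iff]
        intro x hx
        exact hl x ((PySem.Set.mem_ofList _ _).mp hx)
      rw [hsub, if_pos rfl] at h1
      rw [← h1]
      exact (PySem.Set.mem_update _ _ _).mpr (Or.inr hc)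
    · have hrest : onePass fds S = S := by
        obtain ⟨-, ht2⟩ := hlen
        subst ht2
        simpa [onePass] using h2
      exact ih (S := S) hrest fd' hfd'

theorem onePass_subset_closed {fds : List (String × String)} {S : PySem.Set Char} {T : List Char}
    (hc : Closed fds T) (hs : ∀ c ∈ S, c ∈ T) : ∀ c ∈ onePass fds S, c ∈ T := by
  induction fds generalizing S with
  | nil => simpa [onePass]
  | cons fd fds ih =>
    simp only [onePass, List.foldl_cons]
    have hc' : Closed fds T := fun fd' h' => hc fd' (List.mem_cons_of_mem _ h')
    apply ih hc'
    split
    · rename_i hcond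
      intro c hcmem
      rcases (PySem.Set.mem_update _ _ _).mp hcmem with h' | h'
      · exact hs c h'
      · exact hc fd (by simp) (fun x hx => hs x ((PySem.Set.issubset_iff _ _).mp hcond x ((PySem.Set.mem_ofList _ _).mpr hx))) c h'
    · exact hs

theorem loopA_sub {fds : List (String × String)} : ∀ {fuel : Nat} {S : PySem.Set Char},
    ∀ c ∈ S, c ∈ loopA fds fuel S := by
  intro fuel
  induction fuel with
  | zero => intro S c hc; simpa [loopA] using hc
  | succ n ih =>
    intro S c hc
    obtain ⟨t, ht⟩ := onePass_prefix fds S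
    simp only [loopA]
    split
    · exact ht ▸ List.mem_append_left _ hc
    · exact ih c (ht ▸ List.mem_append_left _ hc)

theorem loopA_mono {fds : List (String × String)} {T : List Char} (hc : Closed fds T) :
    ∀ {fuel : Nat} {S : PySem.Set Char}, (∀ c ∈ S, c ∈ T) → ∀ c ∈ loopA fds fuel S, c ∈ T := by
  intro fuel
  induction fuel with
  | zero => intro S hs c hcm; exact hs c (by simpa [loopA] using hcm)
  | succ n ih =>
    intro S hs c hcm
    simp only [loopA] at hcm
    split at hcm
    · exact onePass_subset_closed hc hs c hcm
    · exact ih (onePass_subset_closed hc hs) c hcm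

theorem loopA_closed {fds : List (String × String)} {U : List Char}
    (hU : ∀ fd ∈ fds, ∀ c ∈ fd.2.toList, c ∈ U) :
    ∀ {fuel : Nat} {S : PySem.Set Char}, S.Nodup → (∀ c ∈ S, c ∈ U) →
    U.toFinset.card + 1 - S.length ≤ fuel → Closed fds (loopA fds fuel S) := by
  intro fuel
  induction fuel with
  | zero =>
    intro S hnd hsU hfuel
    exfalso
    have hcard : S.length ≤ U.toFinset.card := by
      have h1 : S.toFinset ⊆ U.toFinset := fun c hcm =>
        List.mem_toFinset.mpr (hsU c (List.mem_toFinset.mp hcm))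
      calc S.length = S.toFinset.card := (List.toFinset_card_of_nodup hnd).symm
        _ ≤ U.toFinset.card := Finset.card_le_card h1
    omega
  | succ n ih =>
    intro S hnd hsU hfuel
    obtain ⟨t, ht⟩ := onePass_prefix fds S
    simp only [loopA]
    split
    · rename_i hlen
      have ht0 : t = [] := by
        have := congrArg List.length ht
        simp at this
        rcases t with _ | _ <;> simp_all
      subst ht0
      simp only [List.append_nil] at ht
      rw [ht]
      exact onePass_fix_closed ht
    · rename_i hlen
      apply ih (nodup_onePass hnd)
      · intro c hcm
        rcases mem_onePass hcm with h' | ⟨fd, hfd, h'⟩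
        · exact hsU c h'
        · exact hU fd hfd c h'
      · have hgrow : S.length < (onePass fds S).length := by
          have := congrArg List.length ht
          simp at this
          rcases t with _ | _ <;> simp_all
        omega

theorem closureA_sub {elems : String} {fds : List (String × String)} :
    ∀ c ∈ elems.toList, c ∈ closureA elems fds := fun c hc =>
  loopA_sub c ((PySem.Set.mem_ofList _ _).mpr hc)

theorem closureA_mono {elems : String} {fds : List (String × String)} {T : List Char}
    (hc : Closed fds T) (he : ∀ c ∈ elems.toList, c ∈ T) :
    ∀ c ∈ closureA elems fds, c ∈ T :=
  loopA_mono hc (fun c h => he c ((PySem.Set.mem_ofList _ _).mp h))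

theorem closureA_closed {elems : String} {fds : List (String × String)} :
    Closed fds (closureA elems fds) := by
  apply loopA_closed (U := elems.toList ++ fds.flatMap (fun fd => fd.2.toList))
  · intro fd hfd c hcm
    exact List.mem_append_right _ (List.mem_flatMap.mpr ⟨fd, hfd, hcm⟩)
  · exact PySem.Set.nodup_ofList _
  · intro c hcm
    exact List.mem_append_left _ ((PySem.Set.mem_ofList _ _).mp hcm)
  · have h1 : (elems.toList ++ fds.flatMap (fun fd => fd.2.toList)).toFinset.card
        ≤ elems.toList.length + (fds.map (fun fd => fd.2.toList.length)).sum := by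
      calc _ ≤ (elems.toList ++ fds.flatMap (fun fd => fd.2.toList)).length :=
            List.toFinset_card_le _
        _ = _ := by simp [List.length_flatMap]
    omega

theorem pickFire_sound {S : PySem.Set Char} : ∀ {rem fd rest}, pickFire S rem = some (fd, rest) →
    fd ∈ rem ∧ (∀ x ∈ rem, x = fd ∨ x ∈ rest) ∧ (∀ x ∈ rest, x ∈ rem) := by
  intro rem
  induction rem with
  | nil => intro _ _ h; simp [pickFire] at h
  | cons a l ih =>
    intro fd rest h
    simp only [pickFire] at h
    split at h
    · simp only [Option.some.injEq, Prod.mk.injEq] at h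
      obtain ⟨rfl, rfl⟩ := h
      refine ⟨List.mem_cons_self, ?_, fun x hx => List.mem_cons_of_mem _ hx⟩
      intro x hx
      rcases List.mem_cons.mp hx with rfl | hx
      · exact Or.inl rfl
      · exact Or.inr hx
    · cases hp : pickFire S l with
      | none => rw [hp] at h; simp at h
      | some p =>
        rw [hp] at h
        simp only [Option.map_some, Option.some.injEq] at h
        obtain ⟨h1, h2, h3⟩ := ih (fd := p.1) (rest := p.2) (by rw [hp])
        cases h
        refine ⟨List.mem_cons_of_mem _ h1, ?_, ?_⟩
        · intro x hx
          rcases List.mem_cons.mp hx with rfl | hx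
          · exact Or.inr List.mem_cons_self
          · rcases h2 x hx with h' | h'
            · exact Or.inl h'
            · exact Or.inr (List.mem_cons_of_mem _ h')
        · intro x hx
          rcases List.mem_cons.mp hx with rfl | hx
          · exact List.mem_cons_self
          · exact List.mem_cons_of_mem _ (h3 x hx)

theorem pickFire_cond {S : PySem.Set Char} : ∀ {rem fd rest}, pickFire S rem = some (fd, rest) →
    (∀ c ∈ fd.1.toList, c ∈ S) := by
  intro rem
  induction rem with
  | nil => intro _ _ h; simp [pickFire] at h
  | cons a l ih =>
    intro fd rest h
    simp only [pickFire] at h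
    split at h
    · rename_i hcond
      simp only [Option.some.injEq, Prod.mk.injEq] at h
      obtain ⟨rfl, rfl⟩ := h
      simp only [Bool.and_eq_true] at hcond
      intro c hc
      exact (PySem.Set.issubset_iff _ _).mp hcond.1 c ((PySem.Set.mem_ofList _ _).mpr hc)
    · cases hp : pickFire S l with
      | none => rw [hp] at h; simp at h
      | some p =>
        rw [hp] at h
        simp only [Option.map_some, Option.some.injEq] at h
        cases h
        exact ih (by rw [hp])

theorem pickFire_none {S : PySem.Set Char} : ∀ {rem}, pickFire S rem = none →
    ∀ fd ∈ rem, (∀ c ∈ fd.1.toList, c ∈ S) → ∀ c ∈ fd.2.toList, c ∈ S := by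
  intro rem
  induction rem with
  | nil => intro _ fd h; simp at h
  | cons a l ih =>
    intro h fd hfd hl
    simp only [pickFire] at h
    split at h
    · simp at h
    · rename_i hcond
      rcases List.mem_cons.mp hfd with rfl | hfd
      · intro c hc
        have hsubl : PySem.Set.issubset (PySem.Set.ofList fd.1.toList) S = true := by
          rw [PySem.Set.issubset_iff]
          intro x hx
          exact hl x ((PySem.Set.mem_ofList _ _).mp hx)
        have hsubr : PySem.Set.issubset (PySem.Set.ofList fd.2.toList) S = true := by
          rcases Bool.eq_false_or_eq_true (PySem.Set.issubset (PySem.Set.ofList fd.2.toList) S) with ht | hf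
          · exact ht
          · exact absurd (by simp [hsubl, hf]) hcond
        exact (PySem.Set.issubset_iff _ _).mp hsubr c ((PySem.Set.mem_ofList _ _).mpr hc)
      · have hnone : pickFire S l = none := by
          cases hp : pickFire S l with
          | none => rfl
          | some p => rw [hp] at h; simp at h
        exact ih hnone fd hfd hl

theorem closLoop_sub {S : PySem.Set Char} {rem : List (String × String)} :
    ∀ c ∈ S, c ∈ closLoop S rem := by
  induction S, rem using closLoop.induct with
  | case1 S rem h => intro c hc; rw [closLoop, h]; exact hc
  | case2 S rem fd rest h ih =>
    intro c hc
    rw [closLoop, h]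
    exact ih c ((PySem.Set.mem_update _ _ _).mpr (Or.inl hc))

theorem closLoop_mono {fds : List (String × String)} {T : List Char} (hc : Closed fds T) :
    ∀ {S : PySem.Set Char} {rem : List (String × String)}, (∀ x ∈ rem, x ∈ fds) →
    (∀ c ∈ S, c ∈ T) → ∀ c ∈ closLoop S rem, c ∈ T := by
  intro S rem
  induction S, rem using closLoop.induct with
  | case1 S rem h => intro _ hs c hcm; rw [closLoop, h] at hcm; exact hs c hcm
  | case2 S rem fd rest h ih =>
    intro hrem hs c hcm
    rw [closLoop, h] at hcm
    obtain ⟨hmem, _, hsub⟩ := pickFire_sound h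
    apply ih (fun x hx => hrem x (hsub x hx)) _ c hcm
    intro c' hcm'
    rcases (PySem.Set.mem_update _ _ _).mp hcm' with h' | h'
    · exact hs c' h'
    · exact hc fd (hrem fd hmem) (fun x hx => hs x (pickFire_cond h x hx)) c' h'

theorem closLoop_closed {fds : List (String × String)} :
    ∀ {S : PySem.Set Char} {rem : List (String × String)},
    (∀ fd ∈ fds, fd ∈ rem ∨ ∀ c ∈ fd.2.toList, c ∈ S) → Closed fds (closLoop S rem) := by
  intro S rem
  induction S, rem using closLoop.induct with
  | case1 S rem h =>
    intro hinv
    rw [closLoop, h]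
    intro fd hfd hl
    rcases hinv fd hfd with h' | h'
    · exact pickFire_none h fd h' hl
    · exact h'
  | case2 S rem fd rest h ih =>
    intro hinv
    rw [closLoop, h]
    apply ih
    intro fd' hfd'
    obtain ⟨hmem, hsplit, _⟩ := pickFire_sound h
    rcases hinv fd' hfd' with h' | h'
    · rcases hsplit fd' h' with rfl | h''
      · exact Or.inr (fun c hc => (PySem.Set.mem_update _ _ _).mpr (Or.inr hc))
      · exact Or.inl h''
    · exact Or.inr (fun c hc => (PySem.Set.mem_update _ _ _).mpr (Or.inl (h' c hc)))

theorem closureB_sub {elems : String} {fds : List (String × String)} :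
    ∀ c ∈ elems.toList, c ∈ closureB elems fds := fun c hc =>
  closLoop_sub c ((PySem.Set.mem_ofList _ _).mpr hc)

theorem closureB_closed {elems : String} {fds : List (String × String)} :
    Closed fds (closureB elems fds) :=
  closLoop_closed (fun _ hfd => Or.inl hfd)

theorem closureB_mono {elems : String} {fds : List (String × String)} {T : List Char}
    (hc : Closed fds T) (he : ∀ c ∈ elems.toList, c ∈ T) :
    ∀ c ∈ closureB elems fds, c ∈ T :=
  closLoop_mono hc (fun _ hx => hx) (fun c h => he c ((PySem.Set.mem_ofList _ _).mp h))

theorem closure_mem_iff {elems : String} {fds : List (String × String)} {c : Char} :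
    c ∈ closureA elems fds ↔ c ∈ closureB elems fds :=
  ⟨fun h => closureA_mono closureB_closed closureB_sub c h,
   fun h => closureB_mono closureA_closed closureA_sub c h⟩

theorem equal_AB (x : String) (fds1 fds2 : List (String × String)) :
    PySem.Set.equal (closureA x fds1) (closureA x fds2)
      = PySem.Set.equal (closureB x fds1) (closureB x fds2) := by
  rcases Bool.eq_false_or_eq_true (PySem.Set.equal (closureB x fds1) (closureB x fds2)) with hB | hB
  · rw [hB]
    rw [PySem.Set.equal_iff] at hB ⊢
    intro c
    rw [closure_mem_iff, closure_mem_iff]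
    exact hB c
  · rw [hB]
    rcases Bool.eq_false_or_eq_true (PySem.Set.equal (closureA x fds1) (closureA x fds2)) with hA | hA
    · exfalso
      have hB' : ¬ PySem.Set.equal (closureB x fds1) (closureB x fds2) = true := by
        simp [hB]
      apply hB'
      rw [PySem.Set.equal_iff] at hA ⊢
      intro c
      rw [← closure_mem_iff, ← closure_mem_iff]
      exact hA c
    · exact hA

theorem checkAll_eq_all (l fds1 fds2 : List (String × String)) :
    checkAll l fds1 fds2
      = l.all (fun i => PySem.Set.equal (closureB i.1 fds1) (closureB i.1 fds2)) := by
  induction l with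
  | nil => rfl
  | cons i rest ih =>
    simp only [checkAll, List.all_cons, equal_AB i.1 fds1 fds2]
    split <;> simp_all

theorem equiv_eq (fds1 fds2 : List (String × String)) :
    equivalance fds1 fds2 = equivalance_alt fds1 fds2 := by
  have hL : equivalance fds1 fds2 = true ↔
      ∀ i ∈ fds1 ++ fds2, PySem.Set.equal (closureB i.1 fds1) (closureB i.1 fds2) = true := by
    simp only [equivalance, checkAll_eq_all]
    split <;> rename_i h
    · simp only [List.all_eq_true] at h ⊢
      constructor
      · intro hall i hi
        rcases List.mem_append.mp hi with h' | h'
        · exact h i h'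
        · exact hall i h'
      · intro hall i hi
        exact hall i (List.mem_append.mpr (Or.inr hi))
    · simp only [List.all_eq_true] at h
      push_neg at h
      obtain ⟨i, hi, hni⟩ := h
      constructor
      · intro hfalse
        exact absurd hfalse (by simp)
      · intro hall
        exact absurd (hall i (List.mem_append.mpr (Or.inl hi))) hni
  have hR : equivalance_alt fds1 fds2 = true ↔
      ∀ i ∈ fds1 ++ fds2, PySem.Set.equal (closureB i.1 fds1) (closureB i.1 fds2) = true := by
    simp only [equivalance_alt, List.all_eq_true]
    constructor
    · intro hall i hi
      exact hall i.1 ((PySem.List.mem_dedup _ _).mpr (List.mem_map.mpr ⟨i, hi, rfl⟩))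
    · intro hall x hx
      obtain ⟨i, hi, rfl⟩ := List.mem_map.mp ((PySem.List.mem_dedup _ _).mp hx)
      exact hall i hi
  rcases Bool.eq_false_or_eq_true (equivalance_alt fds1 fds2) with hB | hB
  · rw [hB]
    exact hL.mpr (hR.mp hB)
  · rw [hB]
    rcases Bool.eq_false_or_eq_true (equivalance fds1 fds2) with hA | hA
    · exfalso
      have hB' : ¬ equivalance_alt fds1 fds2 = true := by simp [hB]
      exact hB' (hR.mpr (hL.mp hA))
    · exact hA


-- ===== VERDICT (by name: the statement is the Claim_ definition above) =====
theorem equivalance_spec : Claim_equal_equivalance := by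
  intro fds1 fds2 _
  show equivalance fds1 fds2 = equivalance_alt fds1 fds2
  exact equiv_eq fds1 fds2
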